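-- pv_equiv track=rewrite | github.com/SNU-CSR/RAG_MentalChatbot | Demo/IntegrationChat.py | retrieve_depression_state
-- ===== SOURCE A (Python) =====
-- def retrieve_depression_state(user_responses):
--     if all(response <= 2 for response in user_responses):
--         return "No depression"
--     elif all(3 <= response <= 4 for response in user_responses):
--         return "Mild"
--     elif all(5 <= response <= 6 for response in user_responses):
--         return "Moderate"
--     else:
--         return "Severe"
-- ===== SOURCE B (Python) =====
-- def retrieve_depression_state(user_responses):
--     if not user_responses:
--         return "No depression"
--     mn = mx = user_responses[0]
--     for r in user_responses[1:]:
--         if r < mn: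
--             mn = r
--         if r > mx:
--             mx = r
--     if mx <= 2:
--         return "No depression"
--     if 3 <= mn and mx <= 4:
--         return "Mild"
--     if 5 <= mn and mx <= 6:
--         return "Moderate"
--     return "Severe"
-- ===== Notes on version B (the rewrite author's own statement) =====
-- stated objective: alternative
-- what changed: Replaces A's three full all() scans with a single min/max pass followed by O(1) range checks on the extremes.
import Mathlib
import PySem

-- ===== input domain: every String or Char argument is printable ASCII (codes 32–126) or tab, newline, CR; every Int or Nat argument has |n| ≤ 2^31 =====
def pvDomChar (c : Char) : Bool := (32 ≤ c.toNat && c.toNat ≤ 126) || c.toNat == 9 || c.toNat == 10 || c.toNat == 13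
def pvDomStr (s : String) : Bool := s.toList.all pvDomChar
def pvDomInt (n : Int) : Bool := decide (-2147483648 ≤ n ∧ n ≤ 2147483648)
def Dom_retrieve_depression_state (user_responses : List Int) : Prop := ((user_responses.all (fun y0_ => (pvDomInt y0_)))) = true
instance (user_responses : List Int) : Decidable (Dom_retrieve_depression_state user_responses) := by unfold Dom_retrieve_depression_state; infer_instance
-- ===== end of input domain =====

-- B replaces A's three full all() scans with one min/max pass and O(1) range checks (alternative decomposition).

-- ===== PORT A =====
def retrieve_depression_state (user_responses : List Int) : String :=
  if user_responses.all (fun response => decide (response ≤ 2)) then "No depression"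
  else if user_responses.all (fun response => decide (3 ≤ response ∧ response ≤ 4)) then "Mild"
  else if user_responses.all (fun response => decide (5 ≤ response ∧ response ≤ 6)) then "Moderate"
  else "Severe"

-- ===== PORT B =====
-- one fold maintaining (mn, mx), then O(1) classification
def pvMMStep (p : Int × Int) (r : Int) : Int × Int :=
  (if r < p.1 then r else p.1, if r > p.2 then r else p.2)

def retrieve_depression_state_alt (user_responses : List Int) : String :=
  match user_responses with
  | [] => "No depression"
  | h :: t =>
    let p := t.foldl pvMMStep (h, h)
    if p.2 ≤ 2 then "No depression"
    else if 3 ≤ p.1 ∧ p.2 ≤ 4 then "Mild"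
    else if 5 ≤ p.1 ∧ p.2 ≤ 6 then "Moderate"
    else "Severe"

-- ===== PRECONDITION & SPEC =====
def Spec_retrieve_depression_state (user_responses : List Int) (out : String) : Prop := out = retrieve_depression_state_alt user_responses
instance (user_responses : List Int) (out : String) : Decidable (Spec_retrieve_depression_state user_responses out) := by unfold Spec_retrieve_depression_state; infer_instance

-- ===== CLAIM (what is proved, stated in full; the proofs are below) =====
def Claim_equal_retrieve_depression_state : Prop := ∀ (user_responses : List Int), Dom_retrieve_depression_state user_responses → Spec_retrieve_depression_state user_responses (retrieve_depression_state user_responses)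

-- ===== LEMMAS AND PROOFS =====
-- the fold's max component bounds exactly the elements together with the start value
theorem pvMM_le_snd (t : List Int) (a b c : Int) :
    (t.foldl pvMMStep (a, b)).2 ≤ c ↔ (b ≤ c ∧ ∀ r ∈ t, r ≤ c) := by
  induction t generalizing a b with
  | nil => simp
  | cons x xs ih =>
    simp only [List.foldl_cons, pvMMStep, ih]
    constructor
    · rintro ⟨h1, h2⟩
      refine ⟨by split_ifs at h1 <;> omega, fun r hr => ?_⟩
      rcases List.mem_cons.mp hr with he | he
      · subst he; split_ifs at h1 <;> omega
      · exact h2 r he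
    · rintro ⟨h1, h2⟩
      refine ⟨?_, fun r hr => h2 r (List.mem_cons_of_mem _ hr)⟩
      have := h2 x (List.mem_cons_self)
      split_ifs <;> omega

-- the fold's min component bounds exactly the elements together with the start value
theorem pvMM_fst_ge (t : List Int) (a b c : Int) :
    c ≤ (t.foldl pvMMStep (a, b)).1 ↔ (c ≤ a ∧ ∀ r ∈ t, c ≤ r) := by
  induction t generalizing a b with
  | nil => simp
  | cons x xs ih =>
    simp only [List.foldl_cons, pvMMStep, ih]
    constructor
    · rintro ⟨h1, h2⟩
      refine ⟨by split_ifs at h1 <;> omega, fun r hr => ?_⟩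
      rcases List.mem_cons.mp hr with he | he
      · subst he; split_ifs at h1 <;> omega
      · exact h2 r he
    · rintro ⟨h1, h2⟩
      refine ⟨?_, fun r hr => h2 r (List.mem_cons_of_mem _ hr)⟩
      have := h2 x (List.mem_cons_self)
      split_ifs <;> omega

-- ===== VERDICT (by name: the statement is the Claim_ definition above) =====
theorem retrieve_depression_state_spec : Claim_equal_retrieve_depression_state := by
  unfold Claim_equal_retrieve_depression_state
  intro xs _
  unfold Spec_retrieve_depression_state retrieve_depression_state retrieve_depression_state_alt
  cases xs with
  | nil => simp
  | cons h t =>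
    simp only [List.all_cons, List.all_eq_true, Bool.and_eq_true, decide_eq_true_eq]
    have hmax := fun c => pvMM_le_snd t h h c
    have hmin := fun c => pvMM_fst_ge t h h c
    have e1 : (h ≤ 2 ∧ ∀ r ∈ t, r ≤ 2) ↔ (t.foldl pvMMStep (h, h)).2 ≤ 2 := (hmax 2).symm
    have e2 : ((3 ≤ h ∧ h ≤ 4) ∧ ∀ r ∈ t, 3 ≤ r ∧ r ≤ 4) ↔
        (3 ≤ (t.foldl pvMMStep (h, h)).1 ∧ (t.foldl pvMMStep (h, h)).2 ≤ 4) := by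
      rw [hmin 3, hmax 4]
      constructor
      · rintro ⟨⟨a, b⟩, hall⟩
        exact ⟨⟨a, fun r hr => (hall r hr).1⟩, b, fun r hr => (hall r hr).2⟩
      · rintro ⟨⟨a, ha⟩, b, hb⟩
        exact ⟨⟨a, b⟩, fun r hr => ⟨ha r hr, hb r hr⟩⟩
    have e3 : ((5 ≤ h ∧ h ≤ 6) ∧ ∀ r ∈ t, 5 ≤ r ∧ r ≤ 6) ↔
        (5 ≤ (t.foldl pvMMStep (h, h)).1 ∧ (t.foldl pvMMStep (h, h)).2 ≤ 6) := by
      rw [hmin 5, hmax 6]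
      constructor
      · rintro ⟨⟨a, b⟩, hall⟩
        exact ⟨⟨a, fun r hr => (hall r hr).1⟩, b, fun r hr => (hall r hr).2⟩
      · rintro ⟨⟨a, ha⟩, b, hb⟩
        exact ⟨⟨a, b⟩, fun r hr => ⟨ha r hr, hb r hr⟩⟩
    rw [if_congr e1 rfl (if_congr e2 rfl (if_congr e3 rfl rfl))]
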